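-- pv_equiv track=rewrite | github.com/thiagofernandes1987-create/APEX | algorithms/uco-sensor/sensor-api/sast/regex_analyzer.py | _alternatives_overlap
-- ===== SOURCE A (Python) =====
-- from typing import List, NamedTuple, Optional
--
-- def _alternatives_overlap(alternatives: List[str]) -> bool:
--     """
--     Heuristic: detect if any two alternation branches share a leading prefix,
--     indicating they can match the same input string.
--
--     Catches:
--       (a|aa)    → 'a' is prefix of 'aa'
--       (ab|a)    → 'a' is prefix of 'ab'
--       (foo|fo)  → 'fo' is prefix of 'foo'
--       (\\w|\\w+) → same class, both start with \\w
--     """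
--     if len(alternatives) < 2:
--         return False
--
--     normed = [a.strip() for a in alternatives if a.strip()]
--
--     for i in range(len(normed)):
--         for j in range(i + 1, len(normed)):
--             a, b = normed[i], normed[j]
--             if not a or not b:
--                 continue
--             # Direct prefix relationship
--             if a.startswith(b) or b.startswith(a):
--                 return True
--             # Same leading character class or literal
--             if _leading_token(a) == _leading_token(b):
--                 return True
--
--     return False
--
-- def _leading_token(s: str) -> str:
--     """
--     Extract the first meaningful token from a pattern fragment.
--     Handles: literals, \\d, \\w, \\s, [class], .
--     """
--     s = s.lstrip("^")
--     if not s: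
--         return ""
--     if s[0] == "\\" and len(s) >= 2:
--         return s[:2]          # e.g. \\w, \\d
--     if s[0] == "[":
--         end = s.find("]", 1)
--         return s[:end + 1] if end != -1 else s[0]
--     return s[0]               # literal character or .
-- ===== SOURCE B (Python) =====
-- def _leading_token(s: str) -> str:
--     s = s.lstrip("^")
--     if not s:
--         return ""
--     if s[0] == "\\" and len(s) >= 2:
--         return s[:2]
--     if s[0] == "[":
--         end = s.find("]", 1)
--         return s[:end + 1] if end != -1 else s[0]
--     return s[0]
--
-- def _alternatives_overlap(alternatives):
--     # B: hash leading tokens for duplicates + sort-and-check-adjacent for prefixes,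
--     # instead of A's all-pairs scan.
--     normed = [a.strip() for a in alternatives if a.strip()]
--     tokens = [_leading_token(s) for s in normed]
--     if len(set(tokens)) < len(tokens):
--         return True
--     srt = sorted(normed)
--     return any(srt[k + 1].startswith(srt[k]) for k in range(len(srt) - 1))
-- ===== Notes on version B (the rewrite author's own statement) =====
-- stated objective: alternative
-- what changed: Replaces A's all-pairs scan with a set-based duplicate check on leading tokens plus sorting the normalized branches and testing only adjacent pairs for the prefix relation (better worst-case asymptotics, but not measurably faster on the random inputs, where A's early exit makes it linear).
import Mathlib
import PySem

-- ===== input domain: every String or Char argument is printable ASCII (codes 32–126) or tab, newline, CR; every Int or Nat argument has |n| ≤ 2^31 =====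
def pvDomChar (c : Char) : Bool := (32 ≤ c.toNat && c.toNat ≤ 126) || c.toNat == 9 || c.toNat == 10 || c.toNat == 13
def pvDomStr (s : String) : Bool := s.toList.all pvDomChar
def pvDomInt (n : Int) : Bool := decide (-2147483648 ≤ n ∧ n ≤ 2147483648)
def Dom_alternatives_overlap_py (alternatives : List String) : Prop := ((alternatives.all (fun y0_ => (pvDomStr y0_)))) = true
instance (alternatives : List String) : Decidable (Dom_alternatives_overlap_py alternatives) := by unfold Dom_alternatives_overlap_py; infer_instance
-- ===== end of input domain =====

-- B replaces A's all-pairs scan by a leading-token duplicate check plus a sort-and-check-adjacent prefix scan (objective: alternative).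
-- ===== PORT A =====
-- _leading_token (helper of both Pythons, identical code in Source A and Source B): s.lstrip("^") with a
-- one-char strip set is dropWhile (= '^') (exact); s.find("]", 1) with a one-char needle is the
-- index of ']' in the tail (exact); s[:end+1] is take (k+2), s[:2] is c :: rest.take 1.
def leadingTokenC (s0 : List Char) : List Char :=
  match s0.dropWhile (· == '^') with
  | [] => []
  | c :: rest =>
    if c = '\\' ∧ rest ≠ [] then c :: rest.take 1          -- s[:2]
    else if c = '[' then
      match rest.idxOf? ']' with
      | some k => (c :: rest).take (k + 2)                  -- s[:end+1]
      | none => [c]                                         -- s[0]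
    else [c]                                                -- s[0]

-- normed = [a.strip() for a in alternatives if a.strip()]  (identical line in both Pythons)
def normedOf (alternatives : List String) : List (List Char) :=
  alternatives.filterMap (fun a =>
    let t := PySem.Chars.strip a.toList
    if t = [] then none else some t)

-- the body of A's inner loop for one pair (i, j)
def pairHitA (a b : List Char) : Bool :=
  if a = [] ∨ b = [] then false
  else if PySem.Chars.startswith a b || PySem.Chars.startswith b a then true
  else leadingTokenC a == leadingTokenC b

-- A's nested loops: for i …: for j in range(i+1, …): … return True / fall through to return False
def loopA : List (List Char) → Bool
  | [] => false
  | a :: rest => rest.any (pairHitA a) || loopA rest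

def alternatives_overlap_py (alternatives : List String) : Bool :=
  if alternatives.length < 2 then false
  else loopA (normedOf alternatives)

-- ===== PORT B =====
-- sorted(normed): Python string < is code-point lexicographic = the Lex order on toList
-- (instances written out so the comparison used is the List Char linear order)
def sortLex (xs : List (List Char)) : List (List Char) :=
  @PySem.List.sorted _ _ List.instLinearOrder.toLT LinearOrder.toDecidableLT xs (fun x => x) false

-- any(srt[k+1].startswith(srt[k]) for k in range(len(srt)-1))
def adjacentPrefix : List (List Char) → Bool
  | [] => false
  | [_] => false
  | a :: b :: rest => PySem.Chars.startswith b a || adjacentPrefix (b :: rest)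

def alternatives_overlap_py_alt (alternatives : List String) : Bool :=
  let normed := normedOf alternatives
  let tokens := normed.map leadingTokenC
  if (PySem.Set.ofList tokens).length < tokens.length then true
  else adjacentPrefix (sortLex normed)

-- ===== PRECONDITION & SPEC =====
def Spec_alternatives_overlap_py (alternatives : List String) (out : Bool) : Prop := out = alternatives_overlap_py_alt alternatives
instance (alternatives : List String) (out : Bool) : Decidable (Spec_alternatives_overlap_py alternatives out) := by unfold Spec_alternatives_overlap_py; infer_instance

-- ===== CLAIM (what is proved, stated in full; the proofs are below) =====
def Claim_equal_alternatives_overlap_py : Prop := ∀ (alternatives : List String), Dom_alternatives_overlap_py alternatives → Spec_alternatives_overlap_py alternatives (alternatives_overlap_py alternatives)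

-- ===== LEMMAS AND PROOFS =====

theorem pv_loopA_eq_false_iff (l : List (List Char)) :
    loopA l = false ↔ l.Pairwise (fun a b => pairHitA a b = false) := by
  induction l with
  | nil => simp [loopA]
  | cons a rest ih => simp [loopA, List.any_eq_false, List.pairwise_cons, ih]

theorem pv_adjacentPrefix_eq_false_iff (S : List (List Char)) :
    adjacentPrefix S = false ↔ List.IsChain (fun a b => ¬ a <+: b) S := by
  induction S with
  | nil => simp [adjacentPrefix]
  | cons a S ih =>
    cases S with
    | nil => simp [adjacentPrefix]
    | cons b t =>
      simp [adjacentPrefix, Bool.or_eq_false_iff, List.isChain_cons_cons, ih,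
        Bool.eq_false_iff, Ne, PySem.Chars.startswith_iff]

theorem pv_pairHitA_comm (a b : List Char) : pairHitA a b = pairHitA b a := by
  unfold pairHitA
  have htok : (leadingTokenC a == leadingTokenC b) = (leadingTokenC b == leadingTokenC a) := by
    exact Bool.beq_comm
  by_cases ha : a = [] <;> by_cases hb : b = [] <;> simp [ha, hb, Bool.or_comm, htok]

theorem pv_pairHitA_eq_false_iff (a b : List Char) (ha : a ≠ []) (hb : b ≠ []) :
    pairHitA a b = false ↔ (¬ a <+: b ∧ ¬ b <+: a ∧ leadingTokenC a ≠ leadingTokenC b) := by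
  simp [pairHitA, ha, hb, PySem.Chars.startswith_iff]
  tauto



theorem pv_nil_le (b : List Char) : ([] : List Char) ≤ b := by
  cases b with
  | nil => exact le_refl _
  | cons c t => exact le_of_lt List.Lex.nil

theorem pv_not_cons_le_nil (c : Char) (a : List Char) : ¬ ((c :: a : List Char) ≤ []) := by
  intro h
  rcases lt_or_eq_of_le h with h | h
  · cases h
  · cases h

theorem pv_cons_le_cons_iff (c d : Char) (a b : List Char) :
    ((c :: a : List Char) ≤ d :: b) ↔ c < d ∨ (c = d ∧ a ≤ b) := by
  constructor
  · intro h
    rcases lt_or_eq_of_le h with h | h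
    · have h' : List.Lex (·<·) (c::a) (d::b) := h
      rcases List.cons_lex_cons_iff.mp h' with h1 | ⟨rfl, h2⟩
      · exact Or.inl h1
      · exact Or.inr ⟨rfl, le_of_lt (show a < b from h2)⟩
    · cases h
      exact Or.inr ⟨rfl, le_refl _⟩
  · rintro (h | ⟨rfl, h⟩)
    · exact le_of_lt (show List.Lex (·<·) (c::a) (d::b) from List.cons_lex_cons_iff.mpr (Or.inl h))
    · rcases lt_or_eq_of_le h with h | rfl
      · exact le_of_lt (show List.Lex (·<·) (c::a) (c::b) from List.cons_lex_cons_iff.mpr (Or.inr ⟨rfl, h⟩))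
      · exact le_refl _

theorem pv_prefix_le (a : List Char) : ∀ b : List Char, a <+: b → a ≤ b := by
  induction a with
  | nil => intro b _; exact pv_nil_le b
  | cons c a ih =>
    intro b h
    obtain ⟨t, rfl⟩ := h
    exact (pv_cons_le_cons_iff ..).mpr (Or.inr ⟨rfl, ih _ (a.prefix_append t)⟩)

theorem pv_sandwich (a : List Char) : ∀ (x b : List Char), a <+: b → a ≤ x → x ≤ b → a <+: x := by
  induction a with
  | nil => intro x b _ _ _; exact x.nil_prefix
  | cons c a ih =>
    intro x b hab hax hxb
    obtain ⟨t, rfl⟩ := hab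
    cases x with
    | nil => exact absurd hax (pv_not_cons_le_nil c a)
    | cons d x =>
      rcases (pv_cons_le_cons_iff ..).mp hax with h1 | ⟨rfl, h1⟩
      · rcases (pv_cons_le_cons_iff ..).mp hxb with h2 | ⟨rfl, h2⟩
        · exact absurd h2 (lt_asymm h1)
        · exact absurd h1 (lt_irrefl _)
      · rcases (pv_cons_le_cons_iff ..).mp hxb with h2 | ⟨-, h2⟩
        · exact absurd h2 (lt_irrefl _)
        · exact List.cons_prefix_cons.mpr ⟨rfl, ih x _ (a.prefix_append t) h1 h2⟩

theorem pv_chain_pairwise (S : List (List Char)) (hle : S.Pairwise (· ≤ ·))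
    (hch : List.IsChain (fun a b => ¬ a <+: b) S) : S.Pairwise (fun a b => ¬ a <+: b) := by
  induction S with
  | nil => exact List.Pairwise.nil
  | cons a S ih =>
    rcases List.pairwise_cons.mp hle with ⟨hale, hle'⟩
    cases S with
    | nil => simp
    | cons b t =>
      rcases List.isChain_cons_cons.mp hch with ⟨hab, hch'⟩
      refine List.pairwise_cons.mpr ⟨?_, ih hle' hch'⟩
      intro x hx hpre
      have hbx : b ≤ x := by
        rcases List.mem_cons.mp hx with rfl | hx'
        · exact le_refl _
        · exact (List.pairwise_cons.mp hle').1 x hx'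
      exact hab (pv_sandwich a b x hpre (hale b (List.mem_cons_self)) hbx)

theorem pv_set_len_lt_iff (xs : List (List Char)) :
    (PySem.Set.ofList xs).length < xs.length ↔ ¬ xs.Nodup := by
  constructor
  · intro h hnd
    rw [PySem.Set.ofList_eq_self_of_nodup xs hnd] at h
    exact lt_irrefl _ h
  · intro hnd
    induction xs using List.reverseRecOn with
    | nil => simp at hnd
    | append_singleton xs x ih =>
      have hof : PySem.Set.ofList (xs ++ [x]) = PySem.Set.add (PySem.Set.ofList xs) x := by
        rw [PySem.Set.ofList_eq_foldl, PySem.Set.ofList_eq_foldl, List.foldl_append]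
        rfl
      by_cases hx : x ∈ xs
      · have : PySem.Set.add (PySem.Set.ofList xs) x = PySem.Set.ofList xs := by
          unfold PySem.Set.add
          simp [(PySem.Set.mem_ofList xs x).mpr hx]
        rw [hof, this]
        simp only [List.length_append, List.length_singleton]
        calc (PySem.Set.ofList xs).length ≤ xs.length := PySem.Set.length_ofList_le xs
          _ < xs.length + 1 := Nat.lt_succ_self _
      · have hnd' : ¬ xs.Nodup := by
          intro hnd2
          apply hnd
          rw [List.nodup_append]
          exact ⟨hnd2, List.nodup_singleton x, by intro a ha b hb; simp only [List.mem_singleton] at hb; subst hb; exact fun he => hx (he ▸ ha)⟩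
        have hlt := ih hnd'
        have : (PySem.Set.add (PySem.Set.ofList xs) x).length ≤ (PySem.Set.ofList xs).length + 1 := by
          unfold PySem.Set.add
          split <;> simp
        rw [hof]
        simp only [List.length_append, List.length_singleton]
        omega

theorem pv_normed_ne_nil (alternatives : List String) :
    ∀ s ∈ normedOf alternatives, s ≠ [] := by
  intro s hs
  rcases List.mem_filterMap.mp hs with ⟨a, -, ha⟩
  by_cases ht : PySem.Chars.strip a.toList = []
  · simp [ht] at ha
  · simp only [ht, if_neg ht] at ha
    simp_all



theorem pv_main (l : List (List Char)) (hne : ∀ s ∈ l, s ≠ []) :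
    (loopA l = false ↔ ((l.map leadingTokenC).Nodup ∧ adjacentPrefix (sortLex l) = false)) := by
  have hperm : (sortLex l).Perm l := @PySem.List.sorted_perm _ _ List.instLinearOrder.toLT LinearOrder.toDecidableLT l (fun x => x) false
  have hsymm : ∀ {x y : List Char}, pairHitA x y = false → pairHitA y x = false := by
    intro x y h; rw [pv_pairHitA_comm]; exact h
  have hSle : (sortLex l).Pairwise (fun a b : List Char => a ≤ b) :=
    PySem.List.sorted_pairwise l (fun x => x)
  have hneS : ∀ s ∈ sortLex l, s ≠ [] := fun s hs => hne s (hperm.mem_iff.mp hs)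
  rw [pv_loopA_eq_false_iff, pv_adjacentPrefix_eq_false_iff]
  constructor
  · intro hpw
    refine ⟨?_, ?_⟩
    · exact List.pairwise_map.mpr (hpw.imp_of_mem (fun {a b} ha hb h =>
        ((pv_pairHitA_eq_false_iff a b (hne a ha) (hne b hb)).mp h).2.2))
    · have hpwS : (sortLex l).Pairwise (fun a b => pairHitA a b = false) :=
        (hperm.pairwise_iff (fun h => hsymm h)).mpr hpw
      exact (hpwS.imp_of_mem (fun {a b} ha hb h =>
        ((pv_pairHitA_eq_false_iff a b (hneS a ha) (hneS b hb)).mp h).1)).isChain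
  · rintro ⟨hnd, hch⟩
    have hSnopre := pv_chain_pairwise _ hSle hch
    have hSnoprerev : (sortLex l).Pairwise (fun a b => ¬ b <+: a) :=
      (hSle.and hSnopre).imp (by
        rintro a b ⟨hle, hnp⟩ hba
        have heq : a = b := le_antisymm hle (pv_prefix_le b a hba)
        exact hnp (heq ▸ List.prefix_rfl))
    have hndS : ((sortLex l).map leadingTokenC).Nodup :=
      ((hperm.map leadingTokenC).nodup_iff).mpr hnd
    have hStok : (sortLex l).Pairwise (fun a b => leadingTokenC a ≠ leadingTokenC b) :=
      List.pairwise_map.mp hndS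
    have hpwS : (sortLex l).Pairwise (fun a b => pairHitA a b = false) :=
      ((hSnopre.and hSnoprerev).and hStok).imp_of_mem (fun {a b} ha hb h =>
        (pv_pairHitA_eq_false_iff a b (hneS a ha) (hneS b hb)).mpr ⟨h.1.1, h.1.2, h.2⟩)
    exact (hperm.pairwise_iff (fun h => hsymm h)).mp hpwS

theorem pv_final (alternatives : List String) :
    alternatives_overlap_py alternatives = alternatives_overlap_py_alt alternatives := by
  unfold alternatives_overlap_py alternatives_overlap_py_alt
  simp only []
  have hne := pv_normed_ne_nil alternatives
  have hmain := pv_main (normedOf alternatives) hne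
  have hguard : alternatives.length < 2 → loopA (normedOf alternatives) = false := by
    intro h
    have hlen : (normedOf alternatives).length ≤ alternatives.length :=
      List.length_filterMap_le _ _
    rcases hl : normedOf alternatives with _ | ⟨a, _ | ⟨b, t⟩⟩
    · rfl
    · simp [loopA]
    · rw [hl] at hlen; simp at hlen; omega
  by_cases hnd : ((normedOf alternatives).map leadingTokenC).Nodup
  · have hset : ¬ (PySem.Set.ofList ((normedOf alternatives).map leadingTokenC)).length <
        ((normedOf alternatives).map leadingTokenC).length := by
      rw [pv_set_len_lt_iff]; simpa using hnd
    rw [if_neg hset]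
    by_cases hlen2 : alternatives.length < 2
    · rw [if_pos hlen2]
      exact ((hmain.mp (hguard hlen2)).2).symm
    · rw [if_neg hlen2]
      cases hA : loopA (normedOf alternatives)
      · exact ((hmain.mp hA).2).symm
      · cases hB : adjacentPrefix (sortLex (normedOf alternatives))
        · exfalso
          have := hmain.mpr ⟨hnd, hB⟩
          rw [hA] at this
          cases this
        · rfl
  · have hset := (pv_set_len_lt_iff _).mpr hnd
    rw [if_pos hset]
    have hA : loopA (normedOf alternatives) = true := by
      cases hA : loopA (normedOf alternatives)
      · exact absurd (hmain.mp hA).1 hnd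
      · rfl
    have hlen2 : ¬ alternatives.length < 2 := by
      intro h
      rw [hguard h] at hA
      cases hA
    rw [if_neg hlen2, hA]

-- ===== VERDICT (by name: the statement is the Claim_ definition above) =====
theorem alternatives_overlap_py_spec : Claim_equal_alternatives_overlap_py := by
  intro alternatives _
  unfold Spec_alternatives_overlap_py
  exact pv_final alternatives
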